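-- pv_equiv track=rewrite | github.com/sankalp-prog/Python-DSA | Interviews/Turing.py | divisibility_quest
-- ===== SOURCE A (Python) =====
-- def divisibility_quest(list: [int], limit: int, divisor: int) -> int:
--     result = set()
--     for i in range(len(list)):
--         curr_sublist = []
--         for j in range(i, len(list)):
--             if list[j] % divisor != 0:
--                 break
--             if len(curr_sublist) < limit:
--                 curr_sublist.append(list[j])
--             if curr_sublist != []:
--                 result.add(tuple(curr_sublist))
--     return result
-- ===== SOURCE B (Python) =====
-- def divisibility_quest(list: [int], limit: int, divisor: int) -> int:
--     # Segment the input into maximal runs of divisor-divisible elements first,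
--     # then enumerate, per run and per start offset, the windows of length 1..limit.
--     result = set()
--     runs = []
--     run = []
--     for x in list:
--         if x % divisor == 0:
--             run.append(x)
--         else:
--             if run:
--                 runs.append(run)
--             run = []
--     if run:
--         runs.append(run)
--     for run in runs:
--         n = len(run)
--         for s in range(n):
--             m = min(limit, n - s)
--             for k in range(1, m + 1):
--                 result.add(tuple(run[s:s + k]))
--     return result
-- ===== Notes on version B (the rewrite author's own statement) =====
-- stated objective: faster
-- what changed: B first segments the list into maximal divisible runs in one pass, then enumerates windows of length 1..limit per run offset, instead of A's per-start rescan to the end of each run that keeps re-adding the saturated tuple.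
import Mathlib
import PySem

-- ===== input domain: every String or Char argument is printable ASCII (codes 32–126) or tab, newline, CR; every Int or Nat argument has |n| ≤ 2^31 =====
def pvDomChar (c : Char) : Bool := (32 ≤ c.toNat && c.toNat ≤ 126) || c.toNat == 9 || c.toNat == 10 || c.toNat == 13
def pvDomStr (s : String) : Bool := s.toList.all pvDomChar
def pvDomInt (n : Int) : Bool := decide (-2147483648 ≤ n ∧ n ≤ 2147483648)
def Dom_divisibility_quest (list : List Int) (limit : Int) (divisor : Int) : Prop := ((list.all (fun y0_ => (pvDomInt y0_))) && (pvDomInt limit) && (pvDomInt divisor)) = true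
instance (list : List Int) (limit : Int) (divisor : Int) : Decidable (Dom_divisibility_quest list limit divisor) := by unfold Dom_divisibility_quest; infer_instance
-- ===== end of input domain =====

-- B segments the list into maximal divisible runs first and enumerates windows of
-- length 1..limit per offset, replacing A's per-start rescan to the run's end (objective: faster).

-- ===== PORT A =====
-- inner 'for j in range(i, len(list))' loop of A, over the remaining elements,
-- carrying (curr_sublist, result); the 'break' is the bare 'res' return.
def pvInnerA (divisor limit : Int) : List Int → List Int → PySem.Set (List Int) → PySem.Set (List Int)
  | [], _, res => res
  | x :: rest, curr, res =>
    if ¬ (PySem.Int.mod x divisor = 0) then res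
    else
      let curr' := if PySem.List.len curr < limit then curr ++ [x] else curr
      let res' := if curr' ≠ [] then PySem.Set.add res curr' else res
      pvInnerA divisor limit rest curr' res'

def divisibility_quest (list : List Int) (limit : Int) (divisor : Int) : List (List Int) :=
  (List.range list.length).foldl
    (fun res i => pvInnerA divisor limit (list.drop i) [] res) PySem.Set.empty

-- ===== PORT B =====
-- one pass of Source B's first loop (plus the trailing 'if run: runs.append(run)'):
-- the maximal runs of consecutive divisible elements, 'run' is the pending run.
def pvRunsB (divisor : Int) : List Int → List Int → List (List Int)
  | [], run => if run = [] then [] else [run]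
  | x :: rest, run =>
    if PySem.Int.mod x divisor = 0 then pvRunsB divisor rest (run ++ [x])
    else (if run = [] then [] else [run]) ++ pvRunsB divisor rest []

-- Source B's 'for s in range(n): for k in range(1, m+1): result.add(tuple(run[s:s+k]))'
def pvAddRunB (limit : Int) (res : PySem.Set (List Int)) (run : List Int) : PySem.Set (List Int) :=
  (List.range run.length).foldl
    (fun res (s : Nat) =>
      (PySem.List.pyRange 1 (min limit ((run.length : Int) - (s : Int)) + 1) 1).foldl
        (fun res k => PySem.Set.add res (PySem.List.slice run (some (s : Int)) (some ((s : Int) + k))))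
        res)
    res

def divisibility_quest_alt (list : List Int) (limit : Int) (divisor : Int) : List (List Int) :=
  (pvRunsB divisor list []).foldl (pvAddRunB limit) PySem.Set.empty

-- ===== PRECONDITION & SPEC =====
-- Pre_ excludes divisor = 0 with a non-empty list: there Python A raises ZeroDivisionError
-- on 'list[j] % divisor' (and so does Python B).
def Pre_divisibility_quest (list : List Int) (limit : Int) (divisor : Int) : Prop :=
  divisor ≠ 0 ∨ list = []
instance (list : List Int) (limit : Int) (divisor : Int) : Decidable (Pre_divisibility_quest list limit divisor) := by unfold Pre_divisibility_quest; infer_instance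

def pvWitness_divisibility_quest : List Int × Int × Int := ([6, 4, 3, 8], 2, 2)

def Spec_divisibility_quest (list : List Int) (limit : Int) (divisor : Int) (out : List (List Int)) : Prop := out = divisibility_quest_alt list limit divisor
instance (list : List Int) (limit : Int) (divisor : Int) (out : List (List Int)) : Decidable (Spec_divisibility_quest list limit divisor out) := by unfold Spec_divisibility_quest; infer_instance

-- ===== CLAIM (what is proved, stated in full; the proofs are below) =====
def Claim_equal_divisibility_quest : Prop := ∀ (list : List Int) (limit : Int) (divisor : Int), Dom_divisibility_quest list limit divisor → Pre_divisibility_quest list limit divisor → Spec_divisibility_quest list limit divisor (divisibility_quest list limit divisor)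

-- ===== LEMMAS AND PROOFS =====

-- the list of tuples A's inner loop adds (in order, duplicates included)
def pvSeqA (divisor limit : Int) : List Int → List Int → List (List Int)
  | [], _ => []
  | x :: rest, curr =>
    if ¬ (PySem.Int.mod x divisor = 0) then []
    else
      let curr' := if PySem.List.len curr < limit then curr ++ [x] else curr
      (if curr' ≠ [] then [curr'] else []) ++ pvSeqA divisor limit rest curr'

-- all tuples A adds, start positions left to right
def pvSA (divisor limit : Int) : List Int → List (List Int)
  | [] => []
  | x :: rest => pvSeqA divisor limit (x :: rest) [] ++ pvSA divisor limit rest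

def pvP (divisor : Int) (x : Int) : Bool := decide (PySem.Int.mod x divisor = 0)

-- the tuples B adds for one offset of a run: windows of length 1..limit from its start
def pvPureOff (limit : Int) (t : List Int) : List (List Int) :=
  (List.range (min limit (t.length : Int)).toNat).map (fun j => t.take (j + 1))

-- all tuples B adds for one run
def pvSeqB (limit : Int) (r : List Int) : List (List Int) :=
  (List.range r.length).flatMap (fun off => pvPureOff limit (r.drop off))

-- the inner k-loop's add list at offset s, port form
def pvOffListB (limit : Int) (r : List Int) (s : Nat) : List (List Int) :=
  (PySem.List.pyRange 1 (min limit ((r.length : Int) - (s : Int)) + 1) 1).map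
    (fun k => PySem.List.slice r (some (s : Int)) (some ((s : Int) + k)))

-- generic: a foldl of updates is one update by the flatMap
theorem pv_foldl_update {α β : Type} [BEq β] [LawfulBEq β] (g : α → List β) :
    ∀ (l : List α) (s : PySem.Set β),
      l.foldl (fun s r => PySem.Set.update s (g r)) s = PySem.Set.update s (l.flatMap g) := by
  intro l
  induction l with
  | nil => intro s; simp [PySem.Set.update_nil]
  | cons r l ih =>
      intro s
      simp only [List.foldl_cons, List.flatMap_cons]
      rw [ih, PySem.Set.update_append]

-- updating with elements already present does nothing
theorem pv_update_absorb {β : Type} [BEq β] [LawfulBEq β] (l1 l2 : List β) (s : PySem.Set β)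
    (h : ∀ y ∈ l2, y ∈ l1) :
    PySem.Set.update s (l1 ++ l2) = PySem.Set.update s l1 := by
  have aux : ∀ (l : List β) (s' : PySem.Set β), (∀ y ∈ l, y ∈ s') → PySem.Set.update s' l = s' := by
    intro l
    induction l with
    | nil => intro s' _; exact PySem.Set.update_nil s'
    | cons y l ih =>
        intro s' hmem
        rw [PySem.Set.update_cons, PySem.Set.add_of_mem (hmem y (by simp))]
        exact ih s' (fun z hz => hmem z (by simp [hz]))
  rw [PySem.Set.update_append]
  exact aux l2 _ (fun y hy => (PySem.Set.mem_update _ _ _).mpr (Or.inr (h y hy)))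

-- A1: the inner loop is one update by pvSeqA
theorem pvInnerA_eq_update (divisor limit : Int) :
    ∀ (ys curr : List Int) (res : PySem.Set (List Int)),
      pvInnerA divisor limit ys curr res = PySem.Set.update res (pvSeqA divisor limit ys curr) := by
  intro ys
  induction ys with
  | nil => intro curr res; simp [pvInnerA, pvSeqA, PySem.Set.update_nil]
  | cons x rest ih =>
      intro curr res
      by_cases hx : PySem.Int.mod x divisor = 0
      · simp only [pvInnerA, pvSeqA, hx, not_true_eq_false, if_false]
        by_cases hc : (if PySem.List.len curr < limit then curr ++ [x] else curr) = []
        · simp only [hc, if_neg (by simp : ¬ (([] : List Int) ≠ []))]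
          rw [ih]
          simp
        · simp only [if_pos hc]
          rw [ih, PySem.Set.update_append, PySem.Set.update_cons, PySem.Set.update_nil]
      · simp [pvInnerA, pvSeqA, hx, PySem.Set.update_nil]

-- A2: pvSeqA only sees the divisible prefix
theorem pvSeqA_takeWhile (divisor limit : Int) :
    ∀ (ys curr : List Int),
      pvSeqA divisor limit ys curr = pvSeqA divisor limit (ys.takeWhile (pvP divisor)) curr := by
  intro ys
  induction ys with
  | nil => intro curr; rfl
  | cons x rest ih =>
      intro curr
      by_cases hx : PySem.Int.mod x divisor = 0
      · have hp : pvP divisor x = true := by simp [pvP, hx]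
        simp only [List.takeWhile_cons, hp, if_true]
        simp only [pvSeqA, hx, not_true_eq_false, if_false]
        rw [ih]
      · have hp : ¬ (pvP divisor x = true) := by simp [pvP, hx]
        simp [hp, pvSeqA, hx]

-- A3: closed form on an all-divisible run, 1 ≤ limit
theorem pvSeqA_run (divisor limit : Int) (hlim : 1 ≤ limit) :
    ∀ (t : List Int), (∀ y ∈ t, pvP divisor y = true) →
      ∀ (curr : List Int), curr.length ≤ limit.toNat →
        pvSeqA divisor limit t curr =
          (List.range t.length).map (fun j => curr ++ t.take (min (j + 1) (limit.toNat - curr.length))) := by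
  intro t
  induction t with
  | nil => intro _ curr _; simp [pvSeqA]
  | cons x t' ih =>
      intro hall curr hcur
      have hx : PySem.Int.mod x divisor = 0 := by
        have := hall x (by simp); simpa [pvP] using this
      simp only [pvSeqA, hx, not_true_eq_false, if_false]
      have hlen : PySem.List.len curr = (curr.length : Int) := by simp [PySem.List.len_eq]
      by_cases hlt : curr.length < limit.toNat
      · have hcond : PySem.List.len curr < limit := by rw [hlen]; omega
        rw [if_pos hcond, if_pos (by simp : curr ++ [x] ≠ [])]
        rw [ih (fun y hy => hall y (by simp [hy])) (curr ++ [x])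
              (by simp [List.length_append]; omega)]
        rw [List.length_cons, List.range_succ_eq_map, List.map_cons, List.map_map]
        rw [List.singleton_append]
        congr 1
        · have h1 : min (0 + 1) (limit.toNat - curr.length) = 1 := by omega
          rw [h1]
          simp
        · apply List.map_congr_left
          intro j hj
          simp only [Function.comp, List.length_append, List.length_singleton]
          have h1 : min (Nat.succ j + 1) (limit.toNat - curr.length)
              = (min (j + 1) (limit.toNat - (curr.length + 1))) + 1 := by omega
          rw [h1, List.take_succ_cons]
          simp [List.append_assoc]
      · have hcond : ¬ (PySem.List.len curr < limit) := by rw [hlen]; omega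
        rw [if_neg hcond]
        have hpos : 0 < curr.length := by omega
        rw [if_pos (List.ne_nil_of_length_pos hpos)]
        rw [ih (fun y hy => hall y (by simp [hy])) curr hcur]
        have hz : limit.toNat - curr.length = 0 := by omega
        simp [hz, List.range_succ_eq_map, List.map_map, Function.comp_def, List.map_const', List.length_range]

-- A3': nothing is collected when limit ≤ 0
theorem pvSeqA_nonpos (divisor limit : Int) (hlim : limit ≤ 0) :
    ∀ (ys : List Int), pvSeqA divisor limit ys [] = [] := by
  intro ys
  induction ys with
  | nil => rfl
  | cons x rest ih =>
      by_cases hx : PySem.Int.mod x divisor = 0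
      · simp only [pvSeqA, hx, not_true_eq_false, if_false]
        have : ¬ (PySem.List.len ([] : List Int) < limit) := by
          simp [PySem.List.len_eq]; omega
        simp only [if_neg this]
        simpa using ih
      · simp [pvSeqA, hx]

-- A4: as an update, pvSeqA on a run equals the duplicate-free pvPureOff
theorem pvSeqA_update_pureOff (divisor limit : Int) (t : List Int)
    (ht : ∀ y ∈ t, pvP divisor y = true) (s : PySem.Set (List Int)) :
    PySem.Set.update s (pvSeqA divisor limit t []) = PySem.Set.update s (pvPureOff limit t) := by
  by_cases hlim : 1 ≤ limit
  · rw [pvSeqA_run divisor limit hlim t ht [] (by simp)]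
    simp only [List.nil_append, List.length_nil, Nat.sub_zero]
    unfold pvPureOff
    have hM : (min limit ((t.length : Nat) : Int)).toNat = min limit.toNat t.length := by omega
    rw [hM]
    by_cases hle : t.length ≤ limit.toNat
    · have h1 : min limit.toNat t.length = t.length := by omega
      rw [h1]
      congr 1
      apply List.map_congr_left
      intro j hj
      have : min (j + 1) limit.toNat = j + 1 := by
        have := List.mem_range.mp hj; omega
      rw [this]
    · have hmin : min limit.toNat t.length = limit.toNat := by omega
      rw [hmin]
      have hsplit : t.length = limit.toNat + (t.length - limit.toNat) := by omega
      rw [hsplit, List.range_add, List.map_append]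
      rw [pv_update_absorb]
      · congr 1
        apply List.map_congr_left
        intro j hj
        have : min (j + 1) limit.toNat = j + 1 := by
          have := List.mem_range.mp hj; omega
        rw [this]
      · intro y hy
        simp only [List.map_map, List.mem_map, List.mem_range, Function.comp] at hy
        obtain ⟨j, hj, hy⟩ := hy
        refine List.mem_map.mpr ⟨limit.toNat - 1, List.mem_range.mpr (by omega), ?_⟩
        rw [← hy]
        congr 1
        omega
  · rw [pvSeqA_nonpos divisor limit (by omega) t]
    unfold pvPureOff
    have hz : (min limit ((t.length : Nat) : Int)).toNat = 0 := by omega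
    rw [hz]
    simp

-- O1: the port's inner add list is pvPureOff of the dropped run
theorem pvOffListB_eq_pureOff (limit : Int) (r : List Int) (s : Nat) (hs : s ≤ r.length) :
    pvOffListB limit r s = pvPureOff limit (r.drop s) := by
  unfold pvOffListB pvPureOff
  rw [PySem.List.pyRange_one, List.map_map]
  have hlen : ((r.drop s).length : Int) = (r.length : Int) - (s : Int) := by
    rw [List.length_drop]; omega
  rw [hlen, add_sub_cancel_right]
  apply List.map_congr_left
  intro k _
  simp only [Function.comp]
  have hc : ((s : Int) + (1 + (k : Int))) = ((s : Int) + ((k + 1 : Nat) : Int)) := by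
    push_cast; ring
  rw [hc, PySem.List.slice_natCast_add]

-- B1: pvAddRunB is one update by pvSeqB
theorem pvAddRunB_eq_update (limit : Int) (s : PySem.Set (List Int)) (r : List Int) :
    pvAddRunB limit s r = PySem.Set.update s (pvSeqB limit r) := by
  unfold pvAddRunB
  have hinner : ∀ (res : PySem.Set (List Int)) (s : Nat),
      (PySem.List.pyRange 1 (min limit ((r.length : Int) - (s : Int)) + 1) 1).foldl
        (fun res k => PySem.Set.add res
          (PySem.List.slice r (some (s : Int)) (some ((s : Int) + k)))) res
      = PySem.Set.update res (pvOffListB limit r s) := by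
    intro res s
    rw [pvOffListB, PySem.Set.update_map_eq_foldl_add]
  rw [List.foldl_ext _ (fun res i => PySem.Set.update res (pvOffListB limit r i)) s
    (fun res i _ => hinner res i)]
  rw [pv_foldl_update]
  unfold pvSeqB
  congr 1
  rw [List.flatMap_def, List.flatMap_def]
  exact congrArg List.flatten (List.map_congr_left
    (fun off hoff => pvOffListB_eq_pureOff limit r off
      (le_of_lt (List.mem_range.mp hoff))))

-- B3: peel the first offset of a run
theorem pvSeqB_cons (limit : Int) (x : Int) (t : List Int) :
    pvSeqB limit (x :: t) = pvPureOff limit (x :: t) ++ pvSeqB limit t := by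
  unfold pvSeqB
  simp only [List.length_cons, List.range_succ_eq_map, List.flatMap_cons, List.drop_zero]
  congr 1
  simp [List.flatMap_map, List.drop_succ_cons]

-- L1: closed form of the run builder
theorem pvRunsB_eq (divisor : Int) :
    ∀ (xs run : List Int),
      pvRunsB divisor xs run =
        (if run ++ xs.takeWhile (pvP divisor) = [] then []
         else [run ++ xs.takeWhile (pvP divisor)]) ++
        pvRunsB divisor ((xs.dropWhile (pvP divisor)).drop 1) [] := by
  intro xs
  induction xs with
  | nil =>
      intro run
      simp [pvRunsB]
  | cons x rest ih =>
      intro run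
      by_cases hx : PySem.Int.mod x divisor = 0
      · have hp : pvP divisor x = true := by simp [pvP, hx]
        simp only [pvRunsB, hx, if_true, List.takeWhile_cons, hp, List.dropWhile_cons, ih (run ++ [x])]
        simp [List.append_assoc]
      · have hp : ¬ (pvP divisor x = true) := by simp [pvP, hx]
        simp only [pvRunsB, hx, if_false, List.takeWhile_cons, List.dropWhile_cons]
        simp [hp]

-- B5: peel a divisible head off the flattened B add list
theorem pvFlatB_cons (divisor limit : Int) (x : Int) (xs : List Int)
    (hx : pvP divisor x = true) :
    (pvRunsB divisor (x :: xs) []).flatMap (pvSeqB limit) =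
      pvPureOff limit (x :: xs.takeWhile (pvP divisor)) ++
        (pvRunsB divisor xs []).flatMap (pvSeqB limit) := by
  have hx0 : PySem.Int.mod x divisor = 0 := by simpa [pvP] using hx
  have h0 : pvRunsB divisor (x :: xs) [] = pvRunsB divisor xs [x] := by
    simp [pvRunsB, hx0]
  rw [h0, pvRunsB_eq divisor xs [x], pvRunsB_eq divisor xs []]
  rw [if_neg (by simp : ([x] ++ xs.takeWhile (pvP divisor)) ≠ [])]
  by_cases ht : xs.takeWhile (pvP divisor) = []
  · simp only [ht, List.append_nil, List.nil_append]
    simp [List.flatMap_cons, pvSeqB_cons, pvSeqB, List.append_assoc]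
  · rw [if_neg (by simp [ht])]
    simp only [List.singleton_append, List.cons_append, List.nil_append, List.flatMap_cons]
    rw [pvSeqB_cons]
    simp [List.append_assoc]

-- MAIN: both add lists produce the same set
theorem pv_main (divisor limit : Int) :
    ∀ (xs : List Int) (s : PySem.Set (List Int)),
      PySem.Set.update s (pvSA divisor limit xs) =
        PySem.Set.update s ((pvRunsB divisor xs []).flatMap (pvSeqB limit)) := by
  intro xs
  induction xs with
  | nil => intro s; simp [pvSA, pvRunsB]
  | cons x rest ih =>
      intro s
      by_cases hx : PySem.Int.mod x divisor = 0
      · have hp : pvP divisor x = true := by simp [pvP, hx]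
        have hall : ∀ y ∈ x :: rest.takeWhile (pvP divisor), pvP divisor y = true := by
          intro y hy
          rcases List.mem_cons.mp hy with h | h
          · subst h; exact hp
          · exact List.mem_takeWhile_imp h
        have hSA : pvSA divisor limit (x :: rest)
            = pvSeqA divisor limit (x :: rest) [] ++ pvSA divisor limit rest := rfl
        rw [hSA, pvSeqA_takeWhile divisor limit (x :: rest) []]
        have htk : (x :: rest).takeWhile (pvP divisor) = x :: rest.takeWhile (pvP divisor) := by
          simp [hp]
        rw [htk, PySem.Set.update_append,
          pvSeqA_update_pureOff divisor limit (x :: rest.takeWhile (pvP divisor)) hall,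
          ih, ← PySem.Set.update_append, ← pvFlatB_cons divisor limit x rest hp]
      · have hA : pvSeqA divisor limit (x :: rest) [] = [] := by simp [pvSeqA, hx]
        have hB : pvRunsB divisor (x :: rest) [] = pvRunsB divisor rest [] := by
          simp [pvRunsB, hx]
        have hSA : pvSA divisor limit (x :: rest)
            = pvSeqA divisor limit (x :: rest) [] ++ pvSA divisor limit rest := rfl
        rw [hSA, hA, List.nil_append, hB]
        exact ih s

-- the A port in update form
theorem pvPortA_eq (divisor limit : Int) :
    ∀ (xs : List Int) (s : PySem.Set (List Int)),
      (List.range xs.length).foldl (fun res i => pvInnerA divisor limit (xs.drop i) [] res) s =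
        PySem.Set.update s (pvSA divisor limit xs) := by
  intro xs
  induction xs with
  | nil => intro s; simp [pvSA, PySem.Set.update_nil]
  | cons x rest ih =>
      intro s
      simp only [List.length_cons, List.range_succ_eq_map, List.foldl_cons, List.foldl_map,
        List.drop_succ_cons, List.drop_zero]
      rw [ih, pvInnerA_eq_update]
      show PySem.Set.update (PySem.Set.update s (pvSeqA divisor limit (x :: rest) [])) (pvSA divisor limit rest) = _
      rw [← PySem.Set.update_append]
      rfl

-- ===== VERDICT (by name: the statement is the Claim_ definition above) =====
theorem divisibility_quest_spec : Claim_equal_divisibility_quest := by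
  intro list limit divisor _ _
  unfold Spec_divisibility_quest divisibility_quest divisibility_quest_alt
  rw [pvPortA_eq]
  have hB : pvAddRunB limit = fun s r => PySem.Set.update s (pvSeqB limit r) := by
    funext s r; exact pvAddRunB_eq_update limit s r
  rw [hB, pv_foldl_update]
  exact pv_main divisor limit list PySem.Set.empty
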